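-- pv_equiv track=rewrite | github.com/dlangleychi/py101 | code_reviews/odd_lists.py | oddities
-- ===== SOURCE A (Python) =====
-- def oddities(the_list):
--     list_with_nones = [
--         val if idx % 2 == 0 else None for idx, val in enumerate(the_list)
--     ]
--
--     final_list = []
--     for item in list_with_nones:
--         if item is not None:
--             final_list.append(item)
--
--     return final_list
-- ===== SOURCE B (Python) =====
-- def oddities(the_list):
--     return [val for idx, val in enumerate(the_list) if idx % 2 == 0]
-- ===== Notes on version B (the rewrite author's own statement) =====
-- stated objective: simpler
-- what changed: Single comprehension over enumerate selecting even indices directly, eliminating A's intermediate None-sentinel list and its second filtering pass.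
import Mathlib
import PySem

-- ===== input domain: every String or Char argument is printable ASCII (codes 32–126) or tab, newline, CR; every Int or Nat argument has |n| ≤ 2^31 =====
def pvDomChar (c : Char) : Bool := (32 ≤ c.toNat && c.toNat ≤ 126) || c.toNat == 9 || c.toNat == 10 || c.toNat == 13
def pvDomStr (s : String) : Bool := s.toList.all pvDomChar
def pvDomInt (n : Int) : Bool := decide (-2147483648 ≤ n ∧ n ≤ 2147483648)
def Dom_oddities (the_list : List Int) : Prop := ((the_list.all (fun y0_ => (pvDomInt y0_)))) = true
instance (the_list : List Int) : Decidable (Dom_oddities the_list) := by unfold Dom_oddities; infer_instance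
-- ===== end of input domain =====

-- B replaces A's intermediate None-sentinel list and second filtering pass by one comprehension over enumerate (objective: simpler).


-- ===== PORT A =====
-- list_with_nones = [val if idx % 2 == 0 else None for idx, val in enumerate(the_list)]
-- then a loop appending each non-None item to final_list
def oddities (the_list : List Int) : List Int :=
  let list_with_nones : List (Option Int) :=
    (PySem.List.enumerate the_list).map
      (fun p => if PySem.Int.mod p.1 2 = 0 then some p.2 else none)
  list_with_nones.foldl
    (fun final_list item =>
      match item with
      | some v => final_list ++ [v]
      | none => final_list) []

-- ===== PORT B =====
-- [val for idx, val in enumerate(the_list) if idx % 2 == 0]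
def oddities_alt (the_list : List Int) : List Int :=
  ((PySem.List.enumerate the_list).filter
    (fun p => PySem.Int.mod p.1 2 == 0)).map (fun p => p.2)

-- ===== PRECONDITION & SPEC =====
def Spec_oddities (the_list : List Int) (out : List Int) : Prop := out = oddities_alt the_list
instance (the_list : List Int) (out : List Int) : Decidable (Spec_oddities the_list out) := by unfold Spec_oddities; infer_instance

-- ===== CLAIM (what is proved, stated in full; the proofs are below) =====
def Claim_equal_oddities : Prop := ∀ (the_list : List Int), Dom_oddities the_list → Spec_oddities the_list (oddities the_list)

-- ===== LEMMAS AND PROOFS =====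

-- A's second pass, run from accumulator acc, is acc ++ (filterMap id).
theorem oddities_foldl_filterMap (l : List (Option Int)) (acc : List Int) :
    l.foldl (fun final_list item =>
      match item with
      | some v => final_list ++ [v]
      | none => final_list) acc = acc ++ l.filterMap id := by
  induction l generalizing acc with
  | nil => simp
  | cons h t ih => cases h <;> simp [List.foldl, ih]

-- the sentinel-map followed by filterMap id equals filter-then-map
theorem oddities_map_filterMap (l : List (Int × Int)) :
    (l.map (fun p => if PySem.Int.mod p.1 2 = 0 then some p.2 else none)).filterMap id
      = (l.filter (fun p => PySem.Int.mod p.1 2 == 0)).map (fun p => p.2) := by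
  induction l with
  | nil => rfl
  | cons h t ih =>
    simp only [List.map_cons, List.filterMap_cons, List.filter_cons]
    by_cases hc : PySem.Int.mod h.1 2 = 0
    · simp only [hc, beq_iff_eq, ih]
      simp
    · simp only [beq_iff_eq, if_neg hc, ih]
      simp

-- ===== VERDICT (by name: the statement is the Claim_ definition above) =====
theorem oddities_spec : Claim_equal_oddities := by
  intro l _
  unfold Spec_oddities oddities oddities_alt
  rw [oddities_foldl_filterMap, List.nil_append, oddities_map_filterMap]
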